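-- pv_equiv track=rewrite | github.com/Miopas/dstc_rnn | preprocess.py | get_fv_ngram
-- ===== SOURCE A (Python) =====
-- def tag_ngrams_list_by_value(ngrams, value):
--     ret_dict = {}
--     for ngram in ngrams:
--         words = ngram.split('_')
--         flag = 0
--         for i in range(len(words)):
--             if (words[i] == value):
--                 flag = 1
--                 words[i] = '<value>'
--         tagged_ngram = '_'.join(words)
--         if (flag == 1):
--             ret_dict[tagged_ngram] = 1.0
--
--     return ret_dict.keys()
--
-- def get_fv_ngram(ngram, slot_values_dict):
--     ret_dict = {} # key is slot, value is ngram list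
--     for (slot, values) in slot_values_dict.items():
--         tmp_list = []
--         for value in values:
--             tagged_ngram = tag_ngrams_list_by_value(ngram, value)
--             tmp_list += list(tagged_ngram)
--         ret_dict[slot] = tmp_list
--     return ret_dict
-- ===== SOURCE B (Python) =====
-- def get_fv_ngram(ngram, slot_values_dict):
--     # Split every ngram once and build an inverted index word -> list of ngram
--     # indices (in order), so each value only visits the ngrams that contain it.
--     split = [g.split('_') for g in ngram]
--     index = {}
--     for j, words in enumerate(split):
--         for w in set(words):
--             index.setdefault(w, []).append(j)
--     ret_dict = {}
--     for slot, values in slot_values_dict.items():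
--         tmp_list = []
--         for value in values:
--             seen = set()
--             for j in index.get(value, ()):
--                 tagged = '_'.join('<value>' if w == value else w for w in split[j])
--                 if tagged not in seen:
--                     seen.add(tagged)
--                     tmp_list.append(tagged)
--         ret_dict[slot] = tmp_list
--     return ret_dict
-- ===== Notes on version B (the rewrite author's own statement) =====
-- stated objective: faster
-- what changed: B splits each ngram once and builds an inverted index word -> ngram indices, so each slot value looks up only the ngrams that contain it instead of rescanning every ngram for every value of every slot.
import Mathlib
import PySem

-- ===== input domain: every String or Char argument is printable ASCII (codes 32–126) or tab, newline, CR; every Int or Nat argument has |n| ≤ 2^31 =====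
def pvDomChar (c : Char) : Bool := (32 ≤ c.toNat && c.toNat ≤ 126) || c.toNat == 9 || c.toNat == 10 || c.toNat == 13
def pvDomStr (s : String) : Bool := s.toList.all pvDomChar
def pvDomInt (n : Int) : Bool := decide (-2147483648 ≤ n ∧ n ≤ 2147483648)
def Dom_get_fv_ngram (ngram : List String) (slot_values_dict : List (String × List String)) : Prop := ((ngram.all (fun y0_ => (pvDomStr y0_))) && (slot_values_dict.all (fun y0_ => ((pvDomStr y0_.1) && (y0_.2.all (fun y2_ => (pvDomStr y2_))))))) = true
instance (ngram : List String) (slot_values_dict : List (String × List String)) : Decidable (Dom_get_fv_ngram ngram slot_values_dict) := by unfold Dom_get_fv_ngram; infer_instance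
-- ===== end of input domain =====

-- B replaces A's scan of every ngram for every value of every slot by an inverted index
-- word -> ngram indices built once, so each value only visits the ngrams containing it.

-- ===== PORT A =====
-- Python g.split('_'): sep "_" ≠ "", so split? is never none; getD [] is unreachable.
def pvSplitU (g : String) : List String := (PySem.Str.split? g "_").getD []

-- the loop 'for i in range(len(words)): if words[i] == value: flag = 1; words[i] = "<value>"'
-- as structural recursion over words, threading the flag (index-wise in-place update = rebuild in order)
def pvTagWordsA (value : String) : List String → Nat → Nat × List String
  | [], flag => (flag, [])
  | w :: ws, flag =>
      let flag' := if w == value then 1 else flag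
      let w' := if w == value then "<value>" else w
      let r := pvTagWordsA value ws flag'
      (r.1, w' :: r.2)

-- Python stores float 1.0 as the dict value; only the keys are returned, value ported as Nat 1
def tag_ngrams_list_by_value (ngrams : List String) (value : String) : List String :=
  (ngrams.foldl (fun (d : PySem.Dict String Nat) g =>
      let words := pvSplitU g
      let r := pvTagWordsA value words 0
      let tagged := PySem.Str.join "_" r.2
      if r.1 == 1 then d.insert tagged 1 else d)
    (PySem.Dict.mk [])).keys

def get_fv_ngram (ngram : List String) (slot_values_dict : List (String × List String)) : List (String × List String) :=
  ((PySem.Dict.ofList slot_values_dict).items.foldl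
    (fun (d : PySem.Dict String (List String)) p =>
      let tmp := p.2.foldl (fun acc value => acc ++ tag_ngrams_list_by_value ngram value) []
      d.insert p.1 tmp)
    (PySem.Dict.mk [])).items

-- ===== PORT B =====
def get_fv_ngram_alt (ngram : List String) (slot_values_dict : List (String × List String)) : List (String × List String) :=
  let split := ngram.map pvSplitU
  let index := (PySem.List.enumerate split).foldl
    (fun (d : PySem.Dict String (List Int)) p =>
      (PySem.Set.ofList p.2).foldl (fun d w => d.insert w (d.getD w [] ++ [p.1])) d)
    (PySem.Dict.mk [])
  ((PySem.Dict.ofList slot_values_dict).items.foldl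
    (fun (d : PySem.Dict String (List String)) p =>
      let tmp := p.2.foldl (fun acc value =>
        let st := (index.getD value []).foldl
          (fun (st : PySem.Set String × List String) j =>
            let tagged := PySem.Str.join "_" ((PySem.List.pyGetD split j []).map
              (fun w => if w == value then "<value>" else w))
            if PySem.Set.contains st.1 tagged then st
            else (PySem.Set.add st.1 tagged, st.2 ++ [tagged]))
          (PySem.Set.empty, [])
        acc ++ st.2) []
      d.insert p.1 tmp)
    (PySem.Dict.mk [])).items

-- ===== PRECONDITION & SPEC =====
def Spec_get_fv_ngram (ngram : List String) (slot_values_dict : List (String × List String)) (out : List (String × List String)) : Prop := out = get_fv_ngram_alt ngram slot_values_dict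
instance (ngram : List String) (slot_values_dict : List (String × List String)) (out : List (String × List String)) : Decidable (Spec_get_fv_ngram ngram slot_values_dict out) := by unfold Spec_get_fv_ngram; infer_instance

-- ===== CLAIM (what is proved, stated in full; the proofs are below) =====
def Claim_equal_get_fv_ngram : Prop := ∀ (ngram : List String) (slot_values_dict : List (String × List String)), Dom_get_fv_ngram ngram slot_values_dict → Spec_get_fv_ngram ngram slot_values_dict (get_fv_ngram ngram slot_values_dict)

-- ===== LEMMAS AND PROOFS =====

-- word with the value replaced by the tag
def pvRep (v w : String) : String := if w == v then "<value>" else w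

-- tagged form of a split ngram
def pvTag (v : String) (ws : List String) : String := PySem.Str.join "_" (ws.map (pvRep v))

-- the tagged ngrams containing v, in scan order, before dedup
def pvCands (v : String) (gs : List String) : List String :=
  gs.filterMap (fun g => if v ∈ pvSplitU g then some (pvTag v (pvSplitU g)) else none)

-- first-occurrence dedup against an already-seen set
def pvDedup (seen : PySem.Set String) : List String → List String
  | [] => []
  | x :: xs => if PySem.Set.contains seen x then pvDedup seen xs
               else x :: pvDedup (PySem.Set.add seen x) xs

theorem pvTagWordsA_eq (v : String) (ws : List String) (f : Nat) :
    pvTagWordsA v ws f = ((if v ∈ ws then 1 else f), ws.map (pvRep v)) := by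
  induction ws generalizing f with
  | nil => simp [pvTagWordsA]
  | cons w ws ih =>
    simp only [pvTagWordsA, ih, List.map_cons, pvRep, List.mem_cons]
    by_cases hw : w = v
    · by_cases hv : v ∈ ws <;> simp [hw, hv]
    · have hvw : ¬ v = w := fun h => hw h.symm
      by_cases hv : v ∈ ws <;> simp [hw, hv, hvw]

theorem keys_insert_dict (d : PySem.Dict String Nat) (k : String) (n : Nat) :
    (d.insert k n).keys = PySem.Set.add d.keys k := by
  have h := PySem.Dict.keys_foldl_insert [k] (fun _ _ => n) d
  simpa [PySem.Set.update] using h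

theorem tagA_fold (v : String) (gs : List String) (d : PySem.Dict String Nat) :
    (gs.foldl (fun (d : PySem.Dict String Nat) g =>
        let words := pvSplitU g
        let r := pvTagWordsA v words 0
        let tagged := PySem.Str.join "_" r.2
        if r.1 == 1 then d.insert tagged 1 else d) d).keys
      = d.keys ++ pvDedup d.keys (pvCands v gs) := by
  induction gs generalizing d with
  | nil => simp [pvCands, pvDedup]
  | cons g gs ih =>
    rw [List.foldl_cons]
    by_cases hv : v ∈ pvSplitU g
    · have hstep : (let words := pvSplitU g
          let r := pvTagWordsA v words 0
          let tagged := PySem.Str.join "_" r.2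
          if (r.1 == 1) = true then d.insert tagged 1 else d)
          = d.insert (pvTag v (pvSplitU g)) 1 := by
        simp [pvTagWordsA_eq, hv, pvTag]
      rw [hstep, ih, keys_insert_dict]
      have hc : pvCands v (g :: gs) = pvTag v (pvSplitU g) :: pvCands v gs := by
        simp [pvCands, hv]
      rw [hc]
      simp only [pvDedup]
      by_cases hct : PySem.Set.contains d.keys (pvTag v (pvSplitU g)) = true
      · have hm : pvTag v (pvSplitU g) ∈ d.keys := (PySem.Set.contains_iff _ _).mp hct
        rw [if_pos hct]
        simp [PySem.Set.add, hm]
      · have hm : pvTag v (pvSplitU g) ∉ d.keys :=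
          fun h => hct ((PySem.Set.contains_iff _ _).mpr h)
        rw [if_neg hct]
        simp [PySem.Set.add, hm]
    · have hstep : (let words := pvSplitU g
          let r := pvTagWordsA v words 0
          let tagged := PySem.Str.join "_" r.2
          if (r.1 == 1) = true then d.insert tagged 1 else d) = d := by
        simp [pvTagWordsA_eq, hv]
      rw [hstep, ih]
      have hc : pvCands v (g :: gs) = pvCands v gs := by
        simp [pvCands, hv]
      rw [hc]

theorem tagA_eq (gs : List String) (v : String) :
    tag_ngrams_list_by_value gs v = pvDedup [] (pvCands v gs) := by
  unfold tag_ngrams_list_by_value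
  rw [tagA_fold v gs (PySem.Dict.mk [])]
  simp [PySem.Dict.keys_mk]

theorem index_inner (v : String) (j : Int) (s : List String) (hs : s.Nodup)
    (d : PySem.Dict String (List Int)) :
    (s.foldl (fun d w => d.insert w (d.getD w [] ++ [j])) d).getD v []
      = d.getD v [] ++ (if v ∈ s then [j] else []) := by
  induction s generalizing d with
  | nil => simp
  | cons w s ih =>
    have hnd : s.Nodup := hs.of_cons
    simp only [List.foldl_cons, ih hnd, PySem.Dict.getD_insert, List.mem_cons]
    by_cases hw : v = w
    · have hvs : w ∉ s := (List.nodup_cons.mp hs).1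
      rw [hw] at *
      simp [hvs]
    · by_cases hv : v ∈ s <;> simp [hw, hv]

theorem index_getD (v : String) (ps : List (Int × List String)) (d : PySem.Dict String (List Int)) :
    (ps.foldl (fun (d : PySem.Dict String (List Int)) p =>
        (PySem.Set.ofList p.2).foldl (fun d w => d.insert w (d.getD w [] ++ [p.1])) d) d).getD v []
      = d.getD v [] ++ ps.filterMap (fun p => if v ∈ p.2 then some p.1 else none) := by
  induction ps generalizing d with
  | nil => simp
  | cons p ps ih =>
    simp only [List.foldl_cons, ih, List.filterMap_cons]
    rw [index_inner v p.1 _ (PySem.Set.nodup_ofList p.2)]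
    by_cases hv : v ∈ p.2
    · simp [hv, (PySem.Set.mem_ofList p.2 v).mpr hv]
    · simp [hv]

theorem seen_fold (tg : Int → String) (js : List Int) (seen : PySem.Set String) (acc : List String) :
    (js.foldl (fun (st : PySem.Set String × List String) j =>
        let tagged := tg j
        if PySem.Set.contains st.1 tagged then st
        else (PySem.Set.add st.1 tagged, st.2 ++ [tagged])) (seen, acc)).2
      = acc ++ pvDedup seen (js.map tg) := by
  induction js generalizing seen acc with
  | nil => simp [pvDedup]
  | cons j js ih =>
    simp only [List.foldl_cons, List.map_cons, pvDedup]
    by_cases hc : tg j ∈ seen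
    · have hcb := (PySem.Set.contains_iff seen (tg j)).mpr hc
      rw [if_pos hcb, if_pos hcb, ih]
    · have hcb : ¬ (PySem.Set.contains seen (tg j) = true) :=
        fun h => hc ((PySem.Set.contains_iff seen (tg j)).mp h)
      rw [if_neg hcb, if_neg hcb, ih]
      simp

theorem filterMap_if_eq (v : String) (ps : List (Int × List String)) :
    ps.filterMap (fun p => if v ∈ p.2 then some p.1 else none)
      = (ps.filter (fun p => decide (v ∈ p.2))).map (fun p => p.1) := by
  induction ps with
  | nil => rfl
  | cons p ps ih => by_cases hv : v ∈ p.2 <;> simp [hv, ih]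

theorem pvCands_eq (v : String) (gs : List String) :
    pvCands v gs = ((gs.map pvSplitU).filter (fun ws => decide (v ∈ ws))).map (pvTag v) := by
  induction gs with
  | nil => rfl
  | cons g gs ih =>
    simp only [pvCands, List.filterMap_cons] at ih ⊢
    by_cases hv : v ∈ pvSplitU g <;> simp [hv, ih]

theorem cands_enumerate (v : String) (gs : List String) :
    ((PySem.List.enumerate (gs.map pvSplitU)).filterMap
        (fun p => if v ∈ p.2 then some p.1 else none)).map
      (fun j => PySem.Str.join "_" ((PySem.List.pyGetD (gs.map pvSplitU) j []).map
        (fun w => if w == v then "<value>" else w)))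
      = pvCands v gs := by
  rw [filterMap_if_eq, List.map_map, pvCands_eq]
  have h1 : ∀ p ∈ (PySem.List.enumerate (gs.map pvSplitU)).filter (fun p => decide (v ∈ p.2)),
      ((fun j => PySem.Str.join "_" ((PySem.List.pyGetD (gs.map pvSplitU) j []).map
          (fun w => if w == v then "<value>" else w))) ∘ (fun p => p.1)) p = pvTag v p.2 := by
    intro p hp
    have hp' := List.mem_of_mem_filter hp
    rw [PySem.List.mem_enumerate_iff] at hp'
    obtain ⟨k, hk, rfl⟩ := hp'
    have : ((0 : Int) + (k : Int)) = (k : Int) := by ring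
    simp only [Function.comp, this, PySem.List.pyGetD_natCast, pvTag]
    rw [List.getD_eq_getElem _ _ hk]
    rfl
  rw [List.map_congr_left h1]
  conv_rhs => rw [show gs.map pvSplitU = (PySem.List.enumerate (gs.map pvSplitU)).map (fun p => p.2) from
    (PySem.List.map_snd_enumerate _ _).symm]
  rw [List.filter_map, List.map_map]
  rfl

theorem per_value_eq (gs : List String) (v : String) :
    ((((PySem.List.enumerate (gs.map pvSplitU)).foldl
        (fun (d : PySem.Dict String (List Int)) p =>
          (PySem.Set.ofList p.2).foldl (fun d w => d.insert w (d.getD w [] ++ [p.1])) d)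
        (PySem.Dict.mk [])).getD v []).foldl
      (fun (st : PySem.Set String × List String) j =>
        let tagged := PySem.Str.join "_" ((PySem.List.pyGetD (gs.map pvSplitU) j []).map
          (fun w => if w == v then "<value>" else w))
        if PySem.Set.contains st.1 tagged then st
        else (PySem.Set.add st.1 tagged, st.2 ++ [tagged]))
      (PySem.Set.empty, [])).2
      = tag_ngrams_list_by_value gs v := by
  rw [index_getD]
  have h0 : (PySem.Dict.mk ([] : List (String × List Int))).getD v [] = [] := by
    simp [PySem.Dict.getD, PySem.Dict.get?]
  rw [h0, List.nil_append]
  rw [seen_fold (fun j => PySem.Str.join "_" ((PySem.List.pyGetD (gs.map pvSplitU) j []).map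
    (fun w => if w == v then "<value>" else w)))]
  rw [cands_enumerate, tagA_eq]
  rfl

-- ===== VERDICT (by name: the statement is the Claim_ definition above) =====
theorem get_fv_ngram_spec : Claim_equal_get_fv_ngram := by
  intro ngram slot_values_dict _
  unfold Spec_get_fv_ngram get_fv_ngram get_fv_ngram_alt
  have h : (fun (acc : List String) value => acc ++ tag_ngrams_list_by_value ngram value)
      = (fun (acc : List String) value =>
          acc ++ ((((PySem.List.enumerate (ngram.map pvSplitU)).foldl
            (fun (d : PySem.Dict String (List Int)) p =>
              (PySem.Set.ofList p.2).foldl (fun d w => d.insert w (d.getD w [] ++ [p.1])) d)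
            (PySem.Dict.mk [])).getD value []).foldl
          (fun (st : PySem.Set String × List String) j =>
            let tagged := PySem.Str.join "_" ((PySem.List.pyGetD (ngram.map pvSplitU) j []).map
              (fun w => if w == value then "<value>" else w))
            if PySem.Set.contains st.1 tagged then st
            else (PySem.Set.add st.1 tagged, st.2 ++ [tagged]))
          (PySem.Set.empty, [])).2) := by
    funext acc value
    rw [per_value_eq ngram value]
  rw [h]
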